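-- pv_equiv track=rewrite | github.com/Anonymous-615/Fa-GRE | models/index_mul.py | group_nodes_by_degree
-- ===== SOURCE A (Python) =====
-- import math
--
-- def group_nodes_by_degree(edge_list):
--     n = len(edge_list)
--     sqrt_n = int(math.sqrt(n))
--
--     # Step 1: Calculate the degree of each node
--     degrees = [(i, len(neighbors)) for i, neighbors in enumerate(edge_list)]
--
--     # Step 2: Sort nodes by degree (from small to large)
--     degrees_sorted = sorted(degrees, key=lambda x: x[1])
--
--     # Step 3: Group nodes into sqrt(n) groups
--     group_list = [0] * n
--     group_size = sqrt_n
--     group_id = 0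
--
--     for idx, (node, degree) in enumerate(degrees_sorted):
--         if idx % group_size == 0 and group_id < sqrt_n:
--             group_id += 1
--         group_list[node] = group_id
--
--     return group_list
-- ===== SOURCE B (Python) =====
-- import math
--
-- def group_nodes_by_degree(edge_list):
--     n = len(edge_list)
--     g = math.isqrt(n)
--     degs = [len(neighbors) for neighbors in edge_list]
--
--     # counting sort on integer degrees: occurrences per degree, then
--     # prefix offsets; a node's rank in the stable degree order is
--     # offset[degree] + (#equal-degree nodes seen so far)
--     counts = {}
--     for d in degs:
--         counts[d] = counts.get(d, 0) + 1
--
--     start = {}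
--     s = 0
--     maxd = max(degs, default=0)
--     for d in range(maxd + 1):
--         if d in counts:
--             start[d] = s
--             s += counts[d]
--
--     seen = {}
--     out = []
--     for d in degs:
--         rank = start[d] + seen.get(d, 0)
--         seen[d] = seen.get(d, 0) + 1
--         out.append(min(rank // g + 1, g))
--     return out
-- ===== Notes on version B (the rewrite author's own statement) =====
-- stated objective: alternative
-- what changed: B replaces A's comparison sort of (node, degree) pairs with a counting-sort rank computation: a degree-count dictionary and prefix offsets give each node's stable rank directly, and the group id is the closed form min(rank // g + 1, g) instead of A's running group_id over the sorted order.
import Mathlib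
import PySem

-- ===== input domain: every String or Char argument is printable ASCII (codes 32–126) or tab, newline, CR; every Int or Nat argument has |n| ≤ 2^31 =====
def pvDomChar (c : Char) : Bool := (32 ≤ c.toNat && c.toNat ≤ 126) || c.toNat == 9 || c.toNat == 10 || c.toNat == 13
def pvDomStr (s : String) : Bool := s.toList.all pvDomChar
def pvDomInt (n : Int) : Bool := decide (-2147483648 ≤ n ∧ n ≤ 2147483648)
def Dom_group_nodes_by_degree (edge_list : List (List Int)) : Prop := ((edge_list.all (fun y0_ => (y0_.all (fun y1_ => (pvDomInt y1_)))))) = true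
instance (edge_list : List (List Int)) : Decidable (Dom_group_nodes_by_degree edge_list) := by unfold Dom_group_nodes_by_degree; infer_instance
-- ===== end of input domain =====

-- B replaces A's comparison sort of the (node, degree) pairs with a counting-sort rank
-- computation on the integer degrees (counts, then prefix offsets, then per-node rank)
-- and a closed form for the group id; objective: alternative algorithm, same observable result.
-- int(math.sqrt(n)) / math.isqrt(n) are both ported as Nat.sqrt (exact for every feasible list length).

-- ===== PORT A =====
def group_nodes_by_degree (edge_list : List (List Int)) : List Int :=
  let n := edge_list.length
  let sqrt_n : Int := (Nat.sqrt n : Int)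
  let degrees : List (Int × Int) :=
    (PySem.List.enumerate edge_list 0).map (fun p => (p.1, (p.2.length : Int)))
  let degrees_sorted := PySem.List.sorted degrees (fun x => x.2) false
  let st := (PySem.List.enumerate degrees_sorted 0).foldl
    (fun (st : List Int × Int) (p : Int × (Int × Int)) =>
      let group_id := if PySem.Int.mod p.1 sqrt_n = 0 ∧ st.2 < sqrt_n then st.2 + 1 else st.2
      (PySem.List.pySetD st.1 p.2.1 group_id, group_id))
    (List.replicate n 0, 0)
  st.1

-- ===== PORT B =====
def group_nodes_by_degree_alt (edge_list : List (List Int)) : List Int :=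
  let n := edge_list.length
  let g : Int := (Nat.sqrt n : Int)
  let degs : List Int := edge_list.map (fun neighbors => (neighbors.length : Int))
  let counts : PySem.Dict Int Int :=
    degs.foldl (fun c d => c.insert d (c.getD d 0 + 1)) PySem.Dict.empty
  let maxd : Int := PySem.List.maxD degs (fun x => x) 0
  let sp := (PySem.List.pyRange 0 (maxd + 1) 1).foldl
    (fun (sp : PySem.Dict Int Int × Int) d =>
      if counts.contains d then (sp.1.insert d sp.2, sp.2 + counts.getD d 0) else sp)
    (PySem.Dict.empty, 0)
  let start := sp.1
  let res := degs.foldl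
    (fun (ac : PySem.Dict Int Int × List Int) d =>
      let rank := start.getD d 0 + ac.1.getD d 0
      (ac.1.insert d (ac.1.getD d 0 + 1),
       ac.2 ++ [min (PySem.Int.floordiv rank g + 1) g]))
    (PySem.Dict.empty, [])
  res.2

-- ===== PRECONDITION & SPEC =====
def Spec_group_nodes_by_degree (edge_list : List (List Int)) (out : List Int) : Prop := out = group_nodes_by_degree_alt edge_list
instance (edge_list : List (List Int)) (out : List Int) : Decidable (Spec_group_nodes_by_degree edge_list out) := by unfold Spec_group_nodes_by_degree; infer_instance

-- ===== CLAIM (what is proved, stated in full; the proofs are below) =====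
def Claim_equal_group_nodes_by_degree : Prop := ∀ (edge_list : List (List Int)), Dom_group_nodes_by_degree edge_list → Spec_group_nodes_by_degree edge_list (group_nodes_by_degree edge_list)

-- ===== LEMMAS AND PROOFS =====

def gval (g t : Int) : Int := min (PySem.Int.floordiv t g + 1) g

def gpre (g : Int) (k : Nat) : Int := if k = 0 then 0 else gval g ((k - 1 : Nat) : Int)

def buildSpec (g : Int) (low : Int → Int) : List Int → List Int → List Int
  | _, [] => []
  | pre, d :: rest => gval g (low d + (pre.count d : Int)) :: buildSpec g low (pre ++ [d]) rest

theorem enumerate_map {α β : Type} (f : α → β) (l : List α) (s : Int) :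
    (PySem.List.enumerate l s).map (fun p => (p.1, f p.2)) = PySem.List.enumerate (l.map f) s := by
  induction l generalizing s with
  | nil => simp [PySem.List.enumerate_nil]
  | cons x t ih => simp [PySem.List.enumerate_cons, ih]

theorem insertBy_prefix {α : Type} (before : α → α → Bool) (x : α) (ys zs : List α)
    (h : ∀ y ∈ ys, before x y = false) :
    PySem.List.insertBy before x (ys ++ zs) = ys ++ PySem.List.insertBy before x zs := by
  induction ys with
  | nil => simp
  | cons y t ih =>
    simp only [List.cons_append, PySem.List.insertBy, h y (by simp)]
    simp [ih (fun a ha => h a (by simp [ha]))]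

theorem insertBy_all_before {α : Type} (before : α → α → Bool) (x : α) (zs : List α)
    (h : ∀ z ∈ zs, before x z = true) :
    PySem.List.insertBy before x zs = x :: zs := by
  cases zs with
  | nil => rfl
  | cons z t => simp [PySem.List.insertBy, h z (by simp)]

theorem countP_enumerate (l : List Int) (s : Int) (q : Int → Bool) :
    (PySem.List.enumerate l s).countP (fun p => q p.2) = l.countP q := by
  induction l generalizing s with
  | nil => simp [PySem.List.enumerate_nil]
  | cons x t ih => simp [PySem.List.enumerate_cons, List.countP_cons, ih]

theorem countP_lt_succ (l : List Int) (c : Int) (hc : 0 ≤ c) :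
    l.countP (fun e => decide (0 ≤ e ∧ e < c + 1)) =
      l.countP (fun e => decide (0 ≤ e ∧ e < c)) + l.count c := by
  induction l with
  | nil => simp
  | cons x t ih =>
    simp only [List.countP_cons, List.count_cons, ih]
    split_ifs <;>
      simp only [decide_eq_true_eq, beq_iff_eq, Nat.add_assoc, Nat.add_comm 1] at * <;> omega

theorem sorted_eq_flat (xs : List (Int × Int)) (M : Int)
    (h : ∀ p ∈ xs, 0 ≤ p.2 ∧ p.2 < M) :
    PySem.List.sorted xs (fun p => p.2) false =
      (PySem.List.pyRange 0 M 1).flatMap (fun d => xs.filter (fun p => p.2 == d)) := by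
  induction xs using List.reverseRecOn with
  | nil =>
    simp [PySem.List.sorted_eq_foldl_insertBy]
  | append_singleton xs x ih =>
    have hx := h x (by simp)
    have hxs : ∀ p ∈ xs, 0 ≤ p.2 ∧ p.2 < M := fun p hp => h p (by simp [hp])
    rw [PySem.List.sorted_eq_foldl_insertBy, List.foldl_append, List.foldl_cons, List.foldl_nil,
      ← PySem.List.sorted_eq_foldl_insertBy, ih hxs]
    set c := x.2 with hc
    have hsplit1 : PySem.List.pyRange 0 M 1
        = PySem.List.pyRange 0 (c + 1) 1 ++ PySem.List.pyRange (c + 1) M 1 :=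
      PySem.List.pyRange_one_append 0 (c+1) M (by omega) (by omega)
    have hsplit2 : PySem.List.pyRange 0 (c + 1) 1
        = PySem.List.pyRange 0 c 1 ++ [c] :=
      PySem.List.pyRange_one_succ_right (by omega)
    -- left side: insert into the flattened buckets of xs
    rw [hsplit1, List.flatMap_append]
    rw [insertBy_prefix _ _ _ _ ?hlow]
    case hlow =>
      intro y hy
      rw [List.mem_flatMap] at hy
      obtain ⟨d, hd, hyf⟩ := hy
      rw [PySem.List.mem_pyRange_one] at hd
      have := List.of_mem_filter hyf
      simp only [beq_iff_eq] at this
      simp only [decide_eq_false_iff_not, not_lt]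
      omega
    rw [insertBy_all_before _ _ _ ?hhigh]
    case hhigh =>
      intro z hz
      rw [List.mem_flatMap] at hz
      obtain ⟨d, hd, hzf⟩ := hz
      rw [PySem.List.mem_pyRange_one] at hd
      have := List.of_mem_filter hzf
      simp only [beq_iff_eq] at this
      simp only [decide_eq_true_eq]
      omega
    -- right side: buckets of xs ++ [x]
    have hfilt_ne : ∀ d : Int, d ≠ c → (xs ++ [x]).filter (fun p => p.2 == d) = xs.filter (fun p => p.2 == d) := by
      intro d hd
      rw [List.filter_append]
      have hnil : List.filter (fun p => p.2 == d) [x] = [] := by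
        simp only [List.filter_cons, List.filter_nil]
        rw [if_neg]
        simp only [beq_iff_eq, ← hc]
        exact fun hh => hd hh.symm
      rw [hnil, List.append_nil]
    have hfilt_c : (xs ++ [x]).filter (fun p => p.2 == c) = xs.filter (fun p => p.2 == c) ++ [x] := by
      rw [List.filter_append]
      congr 1
      simp [← hc]
    have hcongr1 : (PySem.List.pyRange 0 c 1).flatMap (fun d => (xs ++ [x]).filter (fun p => p.2 == d))
        = (PySem.List.pyRange 0 c 1).flatMap (fun d => xs.filter (fun p => p.2 == d)) :=
      List.flatMap_congr (fun d hd => hfilt_ne d (by rw [PySem.List.mem_pyRange_one] at hd; omega))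
    have hcongr2 : (PySem.List.pyRange (c+1) M 1).flatMap (fun d => (xs ++ [x]).filter (fun p => p.2 == d))
        = (PySem.List.pyRange (c+1) M 1).flatMap (fun d => xs.filter (fun p => p.2 == d)) :=
      List.flatMap_congr (fun d hd => hfilt_ne d (by rw [PySem.List.mem_pyRange_one] at hd; omega))
    conv_rhs => rw [hsplit2, List.flatMap_append, List.flatMap_append, List.flatMap_singleton]
    rw [hcongr1, hcongr2, hfilt_c]
    conv_lhs => rw [hsplit2, List.flatMap_append, List.flatMap_singleton]
    simp [List.append_assoc]

theorem ediv_of_decomp {g a q r : Int} (hg : 0 < g) (h : a = g * q + r) (h0 : 0 ≤ r) (h1 : r < g) :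
    a / g = q := ((Int.ediv_emod_unique hg).mpr ⟨by omega, h0, h1⟩).1

theorem gval_step (g : Int) (hg : 1 ≤ g) (k : Nat) :
    (if PySem.Int.mod (k : Int) g = 0 ∧ gpre g k < g then gpre g k + 1 else gpre g k) = gval g k := by
  have hgpos : (0:Int) < g := by omega
  have gval_eq : ∀ t : Int, gval g t = min (t / g + 1) g := by
    intro t; unfold gval; rw [PySem.Int.floordiv_eq_ediv_of_pos hgpos]
  rw [PySem.Int.mod_eq_emod_of_pos hgpos]
  by_cases hk : k = 0
  · subst hk
    have hgp0 : gpre g 0 = 0 := rfl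
    simp only [Nat.cast_zero]
    rw [hgp0, if_pos ⟨Int.zero_emod g, hgpos⟩, gval_eq, Int.zero_ediv]
    omega
  · have hk1 : 1 ≤ k := Nat.one_le_iff_ne_zero.mpr hk
    have hcast : ((k - 1 : Nat) : Int) = (k : Int) - 1 := by omega
    have hgpre : gpre g k = min (((k:Int) - 1) / g + 1) g := by
      unfold gpre; rw [if_neg hk, gval_eq, hcast]
    rw [hgpre, gval_eq]
    set q := (k : Int) / g with hq
    set r := (k : Int) % g with hr
    have hde := Int.mul_ediv_add_emod (k : Int) g
    rw [← hq, ← hr] at hde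
    have hr0 : 0 ≤ r := Int.emod_nonneg _ (by omega)
    have hr1 : r < g := Int.emod_lt_of_pos _ hgpos
    by_cases hrz : r = 0
    · have hexp : g * (q - 1) = g * q - g := by ring
      have hq1 : 1 ≤ q := by nlinarith [hde, hrz, hgpos, (by exact_mod_cast hk1 : (1:Int) ≤ (k:Int))]
      have hdm1 : ((k:Int) - 1) / g = q - 1 :=
        ediv_of_decomp (r := g - 1) hgpos (by omega) (by omega) (by omega)
      rw [hdm1]
      by_cases hqg : q < g
      · rw [if_pos ⟨by omega, by omega⟩]; omega
      · rw [if_neg (by omega)]; omega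
    · have hdm1 : ((k:Int) - 1) / g = q :=
        ediv_of_decomp (r := r - 1) hgpos (by omega) (by omega) (by omega)
      rw [hdm1, if_neg (by omega)]

theorem gpre_succ (g : Int) (k : Nat) : gpre g (k + 1) = gval g (k : Int) := by
  unfold gpre; simp

theorem foldA_eq_write (g : Int) (hg : 1 ≤ g) (ys : List (Int × Int)) :
    ∀ (k : Nat) (gl : List Int),
    (PySem.List.enumerate ys (k : Int)).foldl
      (fun (st : List Int × Int) (p : Int × (Int × Int)) =>
        (PySem.List.pySetD st.1 p.2.1 (if PySem.Int.mod p.1 g = 0 ∧ st.2 < g then st.2 + 1 else st.2),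
         if PySem.Int.mod p.1 g = 0 ∧ st.2 < g then st.2 + 1 else st.2))
      (gl, gpre g k)
    = ((PySem.List.enumerate ys (k : Int)).foldl
        (fun acc p => PySem.List.pySetD acc p.2.1 (gval g p.1)) gl,
       gpre g (k + ys.length)) := by
  induction ys with
  | nil => intro k gl; simp [PySem.List.enumerate_nil]
  | cons y t ih =>
    intro k gl
    simp only [PySem.List.enumerate_cons, List.foldl_cons]
    rw [gval_step g hg k]
    have hcast : (k : Int) + 1 = ((k + 1 : Nat) : Int) := by push_cast; ring
    rw [hcast, ← gpre_succ g k, ih (k + 1), gpre_succ]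
    have harith : k + 1 + t.length = k + (y :: t).length := by simp; omega
    rw [harith]

theorem length_write_fold (g : Int) (ws : List (Int × Int)) : ∀ (k : Int) (gl : List Int),
    ((PySem.List.enumerate ws k).foldl
      (fun acc p => PySem.List.pySetD acc p.2.1 (gval g p.1)) gl).length = gl.length := by
  induction ws with
  | nil => intro k gl; simp [PySem.List.enumerate_nil]
  | cons x t ih =>
    intro k gl
    simp [PySem.List.enumerate_cons, ih, PySem.List.length_pySetD]

theorem write_fold_getElem? (g : Int) (ws : List (Int × Int)) :
    ∀ (k : Nat) (gl : List Int) (i : Nat),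
    (∀ p ∈ ws, 0 ≤ p.1 ∧ p.1 < (gl.length : Int)) → (ws.map Prod.fst).Nodup →
    ((PySem.List.enumerate ws (k : Int)).foldl
      (fun acc p => PySem.List.pySetD acc p.2.1 (gval g p.1)) gl)[i]? =
      (match ws.findIdx? (fun p => p.1 == (i : Int)) with
       | some j => some (gval g ((k + j : Nat) : Int))
       | none => gl[i]?) := by
  induction ws with
  | nil => intro k gl i _ _; simp [PySem.List.enumerate_nil]
  | cons p t ih =>
    intro k gl i hb hnd
    simp only [PySem.List.enumerate_cons, List.foldl_cons]
    have hb0 := hb p (by simp)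
    have hset : PySem.List.pySetD gl p.1 (gval g (k : Int)) = gl.set p.1.toNat (gval g (k : Int)) :=
      PySem.List.pySetD_of_nonneg gl _ hb0.1
    have hlen : (PySem.List.pySetD gl p.1 (gval g (k : Int))).length = gl.length :=
      PySem.List.length_pySetD gl _ _
    have hb' : ∀ q ∈ t, 0 ≤ q.1 ∧ q.1 < ((PySem.List.pySetD gl p.1 (gval g (k : Int))).length : Int) := by
      rw [hlen]; intro q hq; exact hb q (by simp [hq])
    have hnd' : (t.map Prod.fst).Nodup := by simp at hnd; exact hnd.2
    have hcast : (k : Int) + 1 = ((k + 1 : Nat) : Int) := by push_cast; ring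
    rw [hcast, ih (k + 1) _ i hb' hnd']
    by_cases hpi : p.1 = (i : Int)
    · have hfind : t.findIdx? (fun q => q.1 == (i : Int)) = none := by
        rw [List.findIdx?_eq_none_iff]
        intro q hq
        simp only [beq_eq_false_iff_ne]
        intro hqi
        have hmem : q.1 ∈ t.map Prod.fst := List.mem_map.mpr ⟨q, hq, rfl⟩
        rw [hqi, ← hpi] at hmem
        simp only [List.map_cons, List.nodup_cons] at hnd
        exact hnd.1 hmem
      rw [hfind, List.findIdx?_cons, if_pos (by simpa using hpi)]
      simp only []
      rw [hset, hpi]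
      have hiN : ((i:Nat):Int).toNat = i := by simp
      have hilen : i < gl.length := by
        have := hb0.2; rw [hpi] at this; exact_mod_cast this
      rw [hiN, List.getElem?_set_self (by exact hilen)]
      simp
    · rw [List.findIdx?_cons, if_neg (by simpa using hpi)]
      cases hfind : t.findIdx? (fun q => q.1 == (i : Int)) with
      | none =>
        simp only [Option.map_none]
        rw [hset, List.getElem?_set_ne]
        intro hcontr
        apply hpi
        rw [← hcontr]
        exact (Int.toNat_of_nonneg hb0.1).symm ▸ rfl
      | some j =>
        simp only [Option.map_some]
        congr 2
        omega

theorem length_flat_lt (l : List Int) (cN : Nat) :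
    ((PySem.List.pyRange 0 (cN : Int) 1).flatMap
      (fun d => (PySem.List.enumerate l 0).filter (fun p => p.2 == d))).length =
      l.countP (fun e => decide (0 ≤ e ∧ e < (cN : Int))) := by
  induction cN with
  | zero =>
    rw [PySem.List.pyRange_one_eq_nil (by simp)]
    simp only [List.flatMap_nil, List.length_nil]
    symm
    rw [List.countP_eq_zero]
    intro a _; simp only [decide_eq_true_eq]; omega
  | succ m ih =>
    have hsplit : PySem.List.pyRange 0 ((m + 1 : Nat) : Int) 1
        = PySem.List.pyRange 0 (m : Int) 1 ++ [(m : Int)] := by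
      push_cast
      exact PySem.List.pyRange_one_succ_right (Int.natCast_nonneg m)
    rw [hsplit, List.flatMap_append, List.length_append, ih, List.flatMap_singleton]
    rw [List.countP_eq_length_filter.symm]
    have hcnt : (PySem.List.enumerate l 0).countP (fun p => p.2 == (m : Int)) = l.count (m : Int) := by
      rw [countP_enumerate l 0 (fun e => e == (m : Int))]
      rfl
    rw [hcnt]
    push_cast
    rw [countP_lt_succ l (m : Int) (Int.natCast_nonneg m)]

theorem findIdx_bucket (c : Int) :
    ∀ (l : List Int) (s : Int) (i : Nat) (h : i < l.length), l[i] = c →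
    ((PySem.List.enumerate l s).filter (fun p => p.2 == c)).findIdx?
        (fun p => p.1 == s + (i : Nat)) = some ((l.take i).count c) := by
  intro l
  induction l with
  | nil => intro s i h; simp at h
  | cons d t ih =>
    intro s i h hic
    rw [PySem.List.enumerate_cons]
    cases i with
    | zero =>
      simp only [List.getElem_cons_zero] at hic
      subst hic
      rw [List.filter_cons, if_pos (by simp)]
      rw [List.findIdx?_cons, if_pos (by simp)]
      simp
    | succ i' =>
      simp only [List.getElem_cons_succ] at hic
      have hlen : i' < t.length := by simpa using h
      by_cases hdc : d = c
      · rw [List.filter_cons, if_pos (by simp [hdc])]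
        rw [List.findIdx?_cons, if_neg (by simp; omega)]
        have := ih (s + 1) i' hlen hic
        have hidx : s + 1 + (i' : Nat) = s + ((i' + 1 : Nat) : Int) := by push_cast; ring
        rw [hidx] at this
        rw [this]
        simp [List.take_succ_cons, hdc]
      · rw [List.filter_cons, if_neg (by simp [hdc])]
        have := ih (s + 1) i' hlen hic
        have hidx : s + 1 + (i' : Nat) = s + ((i' + 1 : Nat) : Int) := by push_cast; ring
        rw [hidx] at this
        rw [this]
        simp [List.take_succ_cons, hdc]

theorem findIdx_flat (l : List Int) (M : Int) (i : Nat) (hi : i < l.length)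
    (hnn : ∀ e ∈ l, 0 ≤ e) (hM : l[i] < M) :
    ((PySem.List.pyRange 0 M 1).flatMap
        (fun d => (PySem.List.enumerate l 0).filter (fun p => p.2 == d))).findIdx?
      (fun p => p.1 == (i : Int)) =
      some (l.countP (fun e => decide (e < l[i])) + (l.take i).count l[i]) := by
  set c := l[i] with hc
  have hc0 : 0 ≤ c := hnn _ (List.getElem_mem hi)
  have hcN : c = ((c.toNat : Nat) : Int) := by omega
  have hsplit : PySem.List.pyRange 0 M 1
      = PySem.List.pyRange 0 c 1 ++ (PySem.List.pyRange c (c+1) 1 ++ PySem.List.pyRange (c+1) M 1) := by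
    rw [PySem.List.pyRange_one_append 0 c M hc0 (by omega),
        PySem.List.pyRange_one_append c (c+1) M (by omega) (by omega)]
  rw [hsplit, List.flatMap_append, List.findIdx?_append]
  have hF1 : ((PySem.List.pyRange 0 c 1).flatMap
      (fun d => (PySem.List.enumerate l 0).filter (fun p => p.2 == d))).findIdx?
      (fun p => p.1 == (i : Int)) = none := by
    rw [List.findIdx?_eq_none_iff]
    intro q hq
    rw [List.mem_flatMap] at hq
    obtain ⟨d, hd, hqf⟩ := hq
    rw [PySem.List.mem_pyRange_one] at hd
    have hq2 : q.2 = d := by simpa using List.of_mem_filter hqf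
    have hqe := List.mem_of_mem_filter hqf
    rw [PySem.List.mem_enumerate_iff] at hqe
    obtain ⟨k, hk, hqk⟩ := hqe
    simp only [beq_eq_false_iff_ne]
    intro hq1
    have hki : k = i := by
      have : q.1 = (k : Int) := by rw [hqk]; simp
      omega
    subst hki
    rw [hqk] at hq2
    simp at hq2
    omega
  rw [hF1]
  simp only [Option.none_or]
  rw [List.flatMap_append, List.findIdx?_append]
  have hbucket : ((PySem.List.pyRange c (c+1) 1).flatMap
      (fun d => (PySem.List.enumerate l 0).filter (fun p => p.2 == d))).findIdx?
      (fun p => p.1 == (i : Int)) = some ((l.take i).count c) := by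
    rw [PySem.List.pyRange_one_singleton, List.flatMap_singleton]
    have heq : (fun p : Int × Int => p.1 == (i : Int)) = (fun p : Int × Int => p.1 == 0 + (i : Nat)) := by
      funext p; simp
    rw [heq]
    exact findIdx_bucket c l 0 i hi hc.symm
  rw [hbucket]
  simp only [Option.map_some, Option.some_or]
  congr 1
  have hlen : ((PySem.List.pyRange 0 c 1).flatMap
      (fun d => (PySem.List.enumerate l 0).filter (fun p => p.2 == d))).length
      = l.countP (fun e => decide (0 ≤ e ∧ e < c)) := by
    rw [hcN]
    exact length_flat_lt l c.toNat
  rw [hlen]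
  have hcongr : l.countP (fun e => decide (0 ≤ e ∧ e < c)) = l.countP (fun e => decide (e < c)) := by
    apply List.countP_congr
    intro e he
    have := hnn e he
    simp only [decide_eq_true_eq]
    constructor <;> intro <;> omega
  rw [hcongr]
  omega

theorem startLoop (degs : List Int) (cN : Nat) :
    ((PySem.List.pyRange 0 (cN : Int) 1).foldl
      (fun (sp : PySem.Dict Int Int × Int) d =>
        if (PySem.Dict.counter degs).contains d then
          (sp.1.insert d sp.2, sp.2 + (PySem.Dict.counter degs).getD d 0)
        else sp)
      (PySem.Dict.empty, 0)).2 = (degs.countP (fun e => decide (0 ≤ e ∧ e < (cN : Int))) : Int) ∧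
    ∀ d : Int, 0 ≤ d → d < (cN : Int) → degs.contains d = true →
      ((PySem.List.pyRange 0 (cN : Int) 1).foldl
        (fun (sp : PySem.Dict Int Int × Int) d =>
          if (PySem.Dict.counter degs).contains d then
            (sp.1.insert d sp.2, sp.2 + (PySem.Dict.counter degs).getD d 0)
          else sp)
        (PySem.Dict.empty, 0)).1.getD d 0 =
        (degs.countP (fun e => decide (0 ≤ e ∧ e < d)) : Int) := by
  induction cN with
  | zero =>
    have hnil : PySem.List.pyRange 0 ((0:Nat):Int) 1 = [] :=
      PySem.List.pyRange_one_eq_nil (by simp)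
    constructor
    · rw [hnil]
      simp only [List.foldl_nil]
      have : degs.countP (fun e => decide (0 ≤ e ∧ e < ((0:Nat) : Int))) = 0 := by
        rw [List.countP_eq_zero]
        intro a _; simp only [decide_eq_true_eq]; omega
      rw [this]; rfl
    · intro d h0 h1; simp at h1; omega
  | succ m ih =>
    have hsplit : PySem.List.pyRange 0 ((m + 1 : Nat) : Int) 1
        = PySem.List.pyRange 0 (m : Int) 1 ++ [(m : Int)] := by
      push_cast
      exact PySem.List.pyRange_one_succ_right (Int.natCast_nonneg m)
    rw [hsplit, List.foldl_append]
    obtain ⟨ihs, ihd⟩ := ih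
    constructor
    · simp only [List.foldl_cons, List.foldl_nil]
      by_cases hc : (PySem.Dict.counter degs).contains (m : Int) = true
      · rw [if_pos hc, ihs, PySem.Dict.getD_counter]
        push_cast
        rw [countP_lt_succ degs (m : Int) (Int.natCast_nonneg m)]
        push_cast; ring
      · rw [if_neg (by simpa using hc), ihs]
        have hmem : (m : Int) ∉ degs := by
          rw [PySem.Dict.contains_counter] at hc; simpa using hc
        push_cast
        rw [countP_lt_succ degs (m : Int) (Int.natCast_nonneg m), List.count_eq_zero.mpr hmem]
        push_cast; ring
    · intro d h0 h1 hmem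
      simp only [List.foldl_cons, List.foldl_nil]
      by_cases hdm : d = (m : Int)
      · subst hdm
        rw [if_pos (by rw [PySem.Dict.contains_counter]; simpa using hmem)]
        simp only []
        rw [PySem.Dict.getD_insert, if_pos rfl, ihs]
      · have hlt : d < (m : Int) := by push_cast at h1; omega
        by_cases hc : (PySem.Dict.counter degs).contains (m : Int) = true
        · rw [if_pos hc]
          simp only []
          rw [PySem.Dict.getD_insert, if_neg hdm, ihd d h0 hlt hmem]
        · rw [if_neg (by simpa using hc), ihd d h0 hlt hmem]

theorem outLoop (g : Int) (start : PySem.Dict Int Int) (low : Int → Int) :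
    ∀ (rest pre : List Int) (sd : PySem.Dict Int Int) (acc : List Int),
    (∀ d : Int, sd.getD d 0 = (pre.count d : Int)) → (∀ d ∈ rest, start.getD d 0 = low d) →
    (rest.foldl
      (fun (ac : PySem.Dict Int Int × List Int) d =>
        (ac.1.insert d (ac.1.getD d 0 + 1),
         ac.2 ++ [min (PySem.Int.floordiv (start.getD d 0 + ac.1.getD d 0) g + 1) g]))
      (sd, acc)).2 = acc ++ buildSpec g low pre rest := by
  intro rest
  induction rest with
  | nil => intro pre sd acc hsd hst; simp [buildSpec]
  | cons d t ih =>
    intro pre sd acc hsd hst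
    simp only [List.foldl_cons]
    rw [ih (pre ++ [d]) _ _ ?_ (fun e he => hst e (by simp [he]))]
    · rw [hsd d, hst d (by simp)]
      simp [buildSpec, gval, List.append_assoc]
    · intro e
      rw [PySem.Dict.getD_insert]
      by_cases he : e = d
      · subst he; rw [if_pos rfl, hsd]; simp
      · rw [if_neg he, hsd]
        simp [List.count_append, Ne.symm he]

theorem length_buildSpec (g : Int) (low : Int → Int) :
    ∀ (rest pre : List Int), (buildSpec g low pre rest).length = rest.length := by
  intro rest
  induction rest with
  | nil => intro pre; rfl
  | cons d t ih => intro pre; simp [buildSpec, ih]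

theorem buildSpec_getElem (g : Int) (low : Int → Int) :
    ∀ (rest pre : List Int) (j : Nat) (hj : j < rest.length),
    (buildSpec g low pre rest)[j]'(by rw [length_buildSpec]; exact hj) =
      gval g (low rest[j] + ((pre ++ rest.take j).count rest[j] : Int)) := by
  intro rest
  induction rest with
  | nil => intro pre j hj; simp at hj
  | cons d t ih =>
    intro pre j hj
    cases j with
    | zero => simp [buildSpec]
    | succ j' =>
      simp only [buildSpec, List.getElem_cons_succ]
      rw [ih (pre ++ [d]) j' (by simpa using hj)]
      simp [List.append_assoc]

theorem main_equiv (el : List (List Int)) :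
    group_nodes_by_degree el = group_nodes_by_degree_alt el := by
  by_cases hel : el = []
  · subst hel; rfl
  simp only [group_nodes_by_degree, group_nodes_by_degree_alt]
  rw [enumerate_map (fun neighbors => (neighbors.length : Int)) el 0]
  rw [PySem.Dict.foldl_insert_getD_add_one_eq_counter]
  set n := el.length with hn
  set degs := el.map (fun neighbors => (neighbors.length : Int)) with hdegs
  set g := ((Nat.sqrt n : Nat) : Int) with hgdef
  set maxd := PySem.List.maxD degs (fun x => x) 0 with hmaxd
  have hlen_degs : degs.length = n := by rw [hdegs, hn]; simp
  have hg : 1 ≤ g := by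
    rw [hgdef]
    exact_mod_cast Nat.sqrt_pos.mpr (List.length_pos_iff.mpr hel)
  have hnn : ∀ e ∈ degs, 0 ≤ e := by
    intro e he
    rw [hdegs] at he
    obtain ⟨nb, _, rfl⟩ := List.mem_map.mp he
    positivity
  have hub : ∀ e ∈ degs, e ≤ maxd := fun e he => PySem.List.le_maxD_id degs 0 e he
  have hm0 : 0 ≤ maxd := by
    have hpos : 0 < degs.length := by rw [hlen_degs]; exact List.length_pos_iff.mpr hel
    exact le_trans (hnn _ (List.getElem_mem hpos)) (hub _ (List.getElem_mem hpos))
  have hbound : ∀ p ∈ PySem.List.enumerate degs 0, 0 ≤ p.2 ∧ p.2 < maxd + 1 := by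
    intro p hp
    rw [PySem.List.mem_enumerate_iff] at hp
    obtain ⟨k, hk, rfl⟩ := hp
    have hmem : degs[k] ∈ degs := List.getElem_mem hk
    exact ⟨hnn _ hmem, by have := hub _ hmem; omega⟩
  rw [sorted_eq_flat (PySem.List.enumerate degs 0) (maxd + 1) hbound]
  set flat := (PySem.List.pyRange 0 (maxd + 1) 1).flatMap
      (fun d => (PySem.List.enumerate degs 0).filter (fun p => p.2 == d)) with hflat
  -- A's loop as a pure write fold
  have hfold := foldA_eq_write g hg flat 0 (List.replicate n 0)
  rw [show gpre g 0 = (0 : Int) from rfl] at hfold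
  simp only [Nat.cast_zero] at hfold
  rw [hfold]
  -- B's offset dictionary
  have hMN : maxd + 1 = (((maxd + 1).toNat : Nat) : Int) := by omega
  rw [hMN]
  obtain ⟨hs2, hs1⟩ := startLoop degs (maxd + 1).toNat
  -- B's final loop
  rw [outLoop g _ (fun d => (degs.countP (fun e => decide (e < d)) : Int)) degs []
        PySem.Dict.empty [] (fun d => by simp [PySem.Dict.getD_empty])
        (fun d hd => by
          rw [hs1 d (hnn d hd) (by have := hub d hd; omega) (List.elem_eq_true_of_mem hd)]
          show (↑(degs.countP (fun e => decide (0 ≤ e ∧ e < d))) : Int)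
              = ↑(degs.countP (fun e => decide (e < d)))
          congr 1
          apply List.countP_congr
          intro e he
          have := hnn e he
          simp only [decide_eq_true_eq]
          constructor <;> intro <;> omega)]
  simp only [List.nil_append]
  -- membership facts about flat
  have hperm : flat.Perm (PySem.List.enumerate degs 0) := by
    rw [hflat, ← sorted_eq_flat _ _ hbound]
    exact PySem.List.sorted_perm _ _ _
  have hnd : (flat.map Prod.fst).Nodup := by
    rw [(hperm.map Prod.fst).nodup_iff]
    rw [show (Prod.fst : Int × Int → Int) = (fun x => x.1) from rfl,
        PySem.List.map_fst_enumerate]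
    exact PySem.List.nodup_pyRange_one _ _
  have hb : ∀ p ∈ flat, 0 ≤ p.1 ∧ p.1 < ((List.replicate n (0 : Int)).length : Int) := by
    intro p hp
    rw [hperm.mem_iff, PySem.List.mem_enumerate_iff] at hp
    obtain ⟨k, hk, rfl⟩ := hp
    simp only [List.length_replicate]
    refine ⟨by simp, ?_⟩
    simp
    omega
  -- pointwise comparison
  apply List.ext_getElem?
  intro i
  have hwlen : ((PySem.List.enumerate flat 0).foldl
      (fun acc p => PySem.List.pySetD acc p.2.1 (gval g p.1)) (List.replicate n 0)).length
      = n := by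
    rw [length_write_fold, List.length_replicate]
  have hblen : (buildSpec g (fun d => (degs.countP (fun e => decide (e < d)) : Int)) [] degs).length
      = n := by rw [length_buildSpec, hlen_degs]
  by_cases hi : i < n
  · have hwi := write_fold_getElem? g flat 0 (List.replicate n 0) i hb hnd
    simp only [Nat.cast_zero] at hwi
    rw [hwi]
    have hidg : i < degs.length := by omega
    have hMi : degs[i] < maxd + 1 := by
      have := hub _ (List.getElem_mem hidg); omega
    rw [findIdx_flat degs (maxd + 1) i hidg hnn hMi]
    rw [List.getElem?_eq_getElem (by omega : i < (buildSpec g (fun d => (degs.countP (fun e => decide (e < d)) : Int)) [] degs).length)]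
    rw [buildSpec_getElem g _ degs [] i hidg]
    simp only [List.nil_append]
    congr 1
    unfold gval
    congr 1
    push_cast
    ring_nf
  · rw [List.getElem?_eq_none (by omega), List.getElem?_eq_none (by omega)]

-- ===== VERDICT (by name: the statement is the Claim_ definition above) =====
theorem group_nodes_by_degree_spec : Claim_equal_group_nodes_by_degree := by
  intro el _
  unfold Spec_group_nodes_by_degree
  exact main_equiv el
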